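-- pv_equiv track=rewrite | github.com/hjm8377/Algorithm_Practice | practice/BOJ_9019.py | DSLR
-- ===== SOURCE A (Python) =====
-- def DSLR(op, n):
--     if op == 'D':
--         return 2*n % 10000
--     elif op == 'S':
--         return n-1 if n > 0 else 9999
--     elif op == 'L':
--         if n < 1000:
--             tmp = str(n)
--             while len(tmp) < 4:
--                 tmp = '0' + tmp
--         else:
--             tmp = str(n)
--         return int(tmp[1:] + tmp[0])
--     elif op == 'R':
--         if n < 1000:
--             tmp = str(n)
--             while len(tmp) < 4:
--                 tmp = '0' + tmp
--         else:
--             tmp = str(n)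
--         return int(tmp[3] + tmp[:3])
-- ===== SOURCE B (Python) =====
-- def DSLR(op, n):
--     if op == 'D':
--         return 2 * n % 10000
--     if op == 'S':
--         return n - 1 if n > 0 else 9999
--     if op == 'L':
--         return n % 1000 * 10 + n // 1000
--     if op == 'R':
--         return n % 10 * 1000 + n // 10
-- ===== Notes on version B (the rewrite author's own statement) =====
-- stated objective: simpler
-- what changed: L and R are computed by pure integer arithmetic ((n%1000)*10+n//1000 and (n%10)*1000+n//10) instead of A's zero-padding while-loop plus string slicing and int() re-parsing.
-- outside the precondition, e.g. on DSLR('L', 12345): A returns 23451, B returns 3462; on DSLR('R', 12345): A returns 4123, B returns 6234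
import Mathlib
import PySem

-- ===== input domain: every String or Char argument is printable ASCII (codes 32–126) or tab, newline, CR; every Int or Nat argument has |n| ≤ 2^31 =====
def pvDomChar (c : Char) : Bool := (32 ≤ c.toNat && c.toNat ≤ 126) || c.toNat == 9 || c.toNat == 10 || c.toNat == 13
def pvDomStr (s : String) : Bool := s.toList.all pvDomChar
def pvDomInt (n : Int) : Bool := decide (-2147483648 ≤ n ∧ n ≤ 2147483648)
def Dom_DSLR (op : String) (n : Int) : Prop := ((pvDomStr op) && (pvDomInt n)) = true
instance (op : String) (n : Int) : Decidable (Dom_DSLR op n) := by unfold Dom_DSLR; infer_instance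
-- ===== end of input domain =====

-- B replaces A's zero-pad while-loop + string rotate + int() re-parse for 'L'/'R' by direct integer arithmetic.

-- ===== PORT A =====
-- the `while len(tmp) < 4: tmp = '0' + tmp` loop
def dslrPad (t : List Char) : List Char :=
  if t.length < 4 then dslrPad ('0' :: t) else t
termination_by 4 - t.length
decreasing_by simp [List.length_cons]; omega

def DSLR (op : String) (n : Int) : Int :=
  if op = "D" then PySem.Int.mod (2 * n) 10000
  else if op = "S" then (if n > 0 then n - 1 else 9999)
  else if op = "L" then
    let tmp := if n < 1000 then dslrPad (PySem.Int.toChars n) else PySem.Int.toChars n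
    -- int(tmp[1:] + tmp[0]); tmp[0] never raises (str(n) is nonempty); int() raises only for
    -- n < 0 (a '-' inside the rotated string), excluded by Pre_ — `none`/`getD 0` is unreachable there
    match PySem.List.pyGet? tmp 0 with
    | some c => (PySem.Int.ofChars? (PySem.List.slice tmp (some 1) none ++ [c])).getD 0
    | none => 0
  else if op = "R" then
    let tmp := if n < 1000 then dslrPad (PySem.Int.toChars n) else PySem.Int.toChars n
    -- int(tmp[3] + tmp[:3]); tmp[3] raises IndexError for 0 ≤ n < 1000? no — padded to 4; it raises
    -- only for negative n of short decimal form, excluded by Pre_ like the int() ValueError above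
    match PySem.List.pyGet? tmp 3 with
    | some c => (PySem.Int.ofChars? ([c] ++ PySem.List.slice tmp none (some 3))).getD 0
    | none => 0
  else 0

-- ===== PORT B =====
def DSLR_alt (op : String) (n : Int) : Int :=
  if op = "D" then PySem.Int.mod (2 * n) 10000
  else if op = "S" then (if n > 0 then n - 1 else 9999)
  else if op = "L" then PySem.Int.mod n 1000 * 10 + PySem.Int.floordiv n 1000
  else if op = "R" then PySem.Int.mod n 10 * 1000 + PySem.Int.floordiv n 10
  else 0

-- ===== PRECONDITION & SPEC =====
-- Pre_ restricts to the four DSLR opcodes (on any other op A returns None, not an int) and, for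
-- 'L'/'R' only, to the task's natural 4-digit register domain 0 ≤ n < 10000: for n < 0 A raises
-- ValueError inside int(), and for n ≥ 10000 A rotates the ≥5-digit decimal string (outside the
-- BOJ 9019 domain) while B rotates within 4 digits.
def Pre_DSLR (op : String) (n : Int) : Prop :=
  (op = "D" ∨ op = "S" ∨ op = "L" ∨ op = "R") ∧ ((op = "L" ∨ op = "R") → 0 ≤ n ∧ n < 10000)
instance (op : String) (n : Int) : Decidable (Pre_DSLR op n) := by unfold Pre_DSLR; infer_instance

def pvWitness_DSLR : String × Int := ("L", 1234)

def Spec_DSLR (op : String) (n : Int) (out : Int) : Prop := out = DSLR_alt op n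
instance (op : String) (n : Int) (out : Int) : Decidable (Spec_DSLR op n out) := by unfold Spec_DSLR; infer_instance

-- ===== CLAIM (what is proved, stated in full; the proofs are below) =====
def Claim_equal_DSLR : Prop := ∀ (op : String) (n : Int), Dom_DSLR op n → Pre_DSLR op n → Spec_DSLR op n (DSLR op n)

-- ===== LEMMAS AND PROOFS =====

-- Proof-side clone of the (private) digit parser inside PySem.Int.ofChars?; used only through
-- defeq (`show`) in parse4 below, never by the ports.
def pvGo : List Char → Bool → Nat → Option Nat
  | [], afterDigit, acc => if afterDigit = true then some acc else none
  | c :: rest, afterDigit, acc =>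
    if c.isDigit = true then pvGo rest true (acc * 10 + (c.toNat - '0'.toNat))
    else
      if c = '_' ∧ afterDigit = true then
        match rest with
        | d :: _tail => if d.isDigit = true then pvGo rest false acc else none
        | [] => none
      else none

def pvDigitsVal? : List Char → Option Nat
  | [] => none
  | cs => pvGo cs false 0

lemma digitChar_not_space {k : Nat} (hk : k < 10) : PySem.Int.isIntSpace (Nat.digitChar k) = false := by
  interval_cases k <;> decide

lemma digitChar_isDigit {k : Nat} (hk : k < 10) : (Nat.digitChar k).isDigit = true := by
  interval_cases k <;> decide

lemma digitChar_val {k : Nat} (hk : k < 10) : (Nat.digitChar k).toNat - '0'.toNat = k := by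
  interval_cases k <;> decide

lemma digitChar_ne_dash {k : Nat} (hk : k < 10) : Nat.digitChar k ≠ '-' := by
  interval_cases k <;> decide

lemma digitChar_ne_plus {k : Nat} (hk : k < 10) : Nat.digitChar k ≠ '+' := by
  interval_cases k <;> decide

-- int() of a four-digit string
lemma parse4 (a b c d : Nat) (ha : a < 10) (hb : b < 10) (hc : c < 10) (hd : d < 10) :
    PySem.Int.ofChars? [Nat.digitChar a, Nat.digitChar b, Nat.digitChar c, Nat.digitChar d]
      = some ((1000*a + 100*b + 10*c + d : Nat) : Int) := by
  simp only [PySem.Int.ofChars?, List.dropWhile, digitChar_not_space ha, digitChar_not_space hd,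
    List.reverse_cons, List.reverse_nil, List.nil_append, List.cons_append]
  split
  next ds h => exact absurd (List.cons.injEq .. ▸ h).1 (digitChar_ne_dash ha)
  next ds h => exact absurd (List.cons.injEq .. ▸ h).1 (digitChar_ne_plus ha)
  next h1 h2 =>
    show (Option.map (fun n : Int => n)
        (Option.bind (pvDigitsVal? [a.digitChar, b.digitChar, c.digitChar, d.digitChar])
          (fun k : Nat => some ((k : Int))))) = some ((1000*a + 100*b + 10*c + d : Nat) : Int)
    simp only [pvDigitsVal?, pvGo, digitChar_isDigit ha, digitChar_isDigit hb, digitChar_isDigit hc,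
      digitChar_isDigit hd, digitChar_val ha, digitChar_val hb, digitChar_val hc, digitChar_val hd,
      if_pos]
    simp only [Option.bind_some, Option.map_some]
    congr 1
    push_cast
    ring

-- str(n) for 0 ≤ n
lemma toChars_nonneg (n : Int) (h : 0 ≤ n) : PySem.Int.toChars n = Nat.toDigits 10 n.toNat := by
  simp [PySem.Int.toChars, not_lt.2 h]

lemma toDigits4 (m : Nat) (h1 : 1000 ≤ m) (h2 : m < 10000) :
    Nat.toDigits 10 m = [Nat.digitChar (m/1000), Nat.digitChar (m/100%10),
      Nat.digitChar (m/10%10), Nat.digitChar (m%10)] := by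
  rw [Nat.toDigits_of_base_le (by norm_num) (by omega),
      Nat.toDigits_of_base_le (by norm_num) (by omega : 10 ≤ m/10),
      Nat.toDigits_of_base_le (by norm_num) (by omega : 10 ≤ m/10/10),
      Nat.toDigits_of_lt_base (by omega : m/10/10/10 < 10)]
  have e1 : m/10/10 = m/100 := by omega
  have e3 : m/100/10 = m/1000 := by omega
  simp [e1, e3]

lemma toDigits3 (m : Nat) (h1 : 100 ≤ m) (h2 : m < 1000) :
    Nat.toDigits 10 m = [Nat.digitChar (m/100), Nat.digitChar (m/10%10), Nat.digitChar (m%10)] := by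
  rw [Nat.toDigits_of_base_le (by norm_num) (by omega),
      Nat.toDigits_of_base_le (by norm_num) (by omega : 10 ≤ m/10),
      Nat.toDigits_of_lt_base (by omega : m/10/10 < 10)]
  have e1 : m/10/10 = m/100 := by omega
  simp [e1]

lemma toDigits2 (m : Nat) (h1 : 10 ≤ m) (h2 : m < 100) :
    Nat.toDigits 10 m = [Nat.digitChar (m/10), Nat.digitChar (m%10)] := by
  rw [Nat.toDigits_of_base_le (by norm_num) (by omega),
      Nat.toDigits_of_lt_base (by omega : m/10 < 10)]
  simp

lemma toDigits1 (m : Nat) (h2 : m < 10) : Nat.toDigits 10 m = [Nat.digitChar m] :=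
  Nat.toDigits_of_lt_base (by omega)

-- the padded 4-character string of A's 'L'/'R' branches
lemma tmp_eq (m : Nat) (hm : m < 10000) :
    (if (m : Int) < 1000 then dslrPad (PySem.Int.toChars (m : Int)) else PySem.Int.toChars (m : Int))
      = [Nat.digitChar (m/1000), Nat.digitChar (m/100%10),
         Nat.digitChar (m/10%10), Nat.digitChar (m%10)] := by
  have hc : PySem.Int.toChars (m : Int) = Nat.toDigits 10 m := by
    rw [toChars_nonneg _ (by positivity)]; simp
  by_cases h4 : 1000 ≤ m
  · rw [if_neg (by exact_mod_cast not_lt.2 (by exact_mod_cast h4)), hc, toDigits4 m h4 hm]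
  · rw [if_pos (by exact_mod_cast lt_of_not_ge h4), hc]
    by_cases h3 : 100 ≤ m
    · rw [toDigits3 m h3 (by omega)]
      rw [dslrPad, if_pos (by simp), dslrPad, if_neg (by simp)]
      have e0 : m/1000 = 0 := by omega
      have e1 : m/100%10 = m/100 := by omega
      simp [e0, e1]
      decide
    · by_cases h2 : 10 ≤ m
      · rw [toDigits2 m h2 (by omega)]
        rw [dslrPad, if_pos (by simp), dslrPad, if_pos (by simp), dslrPad, if_neg (by simp)]
        have e0 : m/1000 = 0 := by omega
        have e1 : m/100%10 = 0 := by omega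
        have e2 : m/10%10 = m/10 := by omega
        simp [e0, e1, e2]
        decide
      · rw [toDigits1 m (by omega)]
        rw [dslrPad, if_pos (by simp), dslrPad, if_pos (by simp), dslrPad, if_pos (by simp),
            dslrPad, if_neg (by simp)]
        have e0 : m/1000 = 0 := by omega
        have e1 : m/100%10 = 0 := by omega
        have e2 : m/10%10 = 0 := by omega
        have e3 : m%10 = m := by omega
        simp [e0, e1, e2, e3]
        decide

set_option maxRecDepth 8000 in
lemma L_eq (n : Int) (h0 : 0 ≤ n) (h1 : n < 10000) : DSLR "L" n = DSLR_alt "L" n := by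
  obtain ⟨m, rfl⟩ := Int.eq_ofNat_of_zero_le h0
  have hm : m < 10000 := by exact_mod_cast h1
  have h1000 : m/1000 < 10 := by omega
  simp only [DSLR, DSLR_alt, String.reduceEq, reduceIte, tmp_eq m hm]
  rw [PySem.List.pyGet?_zero_cons, PySem.List.slice_from_one]
  simp only [List.tail_cons, List.cons_append, List.nil_append]
  rw [parse4 _ _ _ _ (by omega) (by omega) (by omega) h1000]
  rw [PySem.Int.mod_eq_emod_of_pos (by norm_num), PySem.Int.floordiv_eq_ediv_of_pos (by norm_num)]
  simp only [Option.getD_some]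
  push_cast
  omega

set_option maxRecDepth 8000 in
lemma R_eq (n : Int) (h0 : 0 ≤ n) (h1 : n < 10000) : DSLR "R" n = DSLR_alt "R" n := by
  obtain ⟨m, rfl⟩ := Int.eq_ofNat_of_zero_le h0
  have hm : m < 10000 := by exact_mod_cast h1
  have h1000 : m/1000 < 10 := by omega
  simp only [DSLR, DSLR_alt, String.reduceEq, reduceIte, tmp_eq m hm]
  rw [show (3 : Int) = ((3 : Nat) : Int) by norm_num, PySem.List.pyGet?_natCast,
      PySem.List.slice_to_natCast]
  simp only [List.getElem?_cons_succ, List.getElem?_cons_zero, List.take_succ_cons,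
    List.take_zero, List.cons_append, List.nil_append]
  rw [parse4 _ _ _ _ (by omega) h1000 (by omega) (by omega)]
  rw [PySem.Int.mod_eq_emod_of_pos (by norm_num), PySem.Int.floordiv_eq_ediv_of_pos (by norm_num)]
  simp only [Option.getD_some]
  push_cast
  omega

-- ===== VERDICT (by name: the statement is the Claim_ definition above) =====
theorem DSLR_spec : Claim_equal_DSLR := by
  intro op n _ hpre
  obtain ⟨hop, hLR⟩ := hpre
  unfold Spec_DSLR
  rcases hop with rfl | rfl | rfl | rfl
  · rfl
  · rfl
  · exact (L_eq n (hLR (Or.inl rfl)).1 (hLR (Or.inl rfl)).2).symm ▸ rfl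
  · exact (R_eq n (hLR (Or.inr rfl)).1 (hLR (Or.inr rfl)).2).symm ▸ rfl
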